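-- pv_equiv track=rewrite | github.com/moooooongi/python_codetest | 프로그래머스/1/42862. 체육복/체육복.py | solution
-- ===== SOURCE A (Python) =====
-- def solution(n, lost, reserve):
--     reserve,lost = sorted(set(reserve)-set(lost)), sorted(set(lost)-set(reserve))
--
--     for i in lost[:]:
--         if i-1 in reserve:
--             reserve.remove(i-1)
--             lost.remove(i)
--         elif i+1 in reserve:
--             reserve.remove(i+1)
--             lost.remove(i)
--     answer = n - len(lost)
--     return answer
-- ===== SOURCE B (Python) =====
-- def solution(n, lost, reserve):
--     L = sorted(set(lost) - set(reserve))
--     R = sorted(set(reserve) - set(lost))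
--     j = 0
--     matched = 0
--     for i in L:
--         while j < len(R) and R[j] < i - 1:
--             j += 1
--         if j < len(R) and R[j] == i - 1:
--             matched += 1
--             j += 1
--         elif j < len(R) and R[j] == i + 1:
--             matched += 1
--             j += 1
--     return n - (len(L) - matched)
-- ===== Notes on version B (the rewrite author's own statement) =====
-- stated objective: faster
-- what changed: A repeatedly scans and mutates the reserve list with 'in'/remove inside the loop (quadratic); B does a single two-pointer merge over the two sorted disjoint lists, counting matches without any membership scan or removal.
import Mathlib
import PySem

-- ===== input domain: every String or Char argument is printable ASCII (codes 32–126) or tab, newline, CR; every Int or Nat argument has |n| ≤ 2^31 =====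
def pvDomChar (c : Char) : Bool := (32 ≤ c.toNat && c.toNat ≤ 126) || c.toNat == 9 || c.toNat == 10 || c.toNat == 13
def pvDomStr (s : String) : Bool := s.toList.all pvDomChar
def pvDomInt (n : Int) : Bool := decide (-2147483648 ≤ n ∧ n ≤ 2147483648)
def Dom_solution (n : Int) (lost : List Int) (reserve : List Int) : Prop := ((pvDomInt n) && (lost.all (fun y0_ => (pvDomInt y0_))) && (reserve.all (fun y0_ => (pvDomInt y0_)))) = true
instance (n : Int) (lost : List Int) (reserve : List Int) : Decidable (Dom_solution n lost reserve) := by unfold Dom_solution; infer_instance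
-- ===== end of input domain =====

-- B replaces A's repeated 'in'/remove scans on the reserve list by a single two-pointer
-- merge over the two sorted disjoint lists (objective: alternative; O(m·k) inner scans become O(m+k)).

-- ===== PORT A =====
-- the 'for i in lost[:] : …' loop: state = (reserve, lost), iterating over the frozen copy
def aLoop : List Int → List Int → List Int → List Int × List Int
  | [], res, lst => (res, lst)
  | i :: t, res, lst =>
    if (i - 1) ∈ res then aLoop t (res.erase (i - 1)) (lst.erase i)
    else if (i + 1) ∈ res then aLoop t (res.erase (i + 1)) (lst.erase i)
    else aLoop t res lst

def solution (n : Int) (lost : List Int) (reserve : List Int) : Int :=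
  let res := PySem.List.sorted (PySem.Set.diff (PySem.Set.ofList reserve) (PySem.Set.ofList lost)) (fun x => x) false
  let lst := PySem.List.sorted (PySem.Set.diff (PySem.Set.ofList lost) (PySem.Set.ofList reserve)) (fun x => x) false
  n - ((aLoop lst res lst).2.length : Int)

-- ===== PORT B =====
-- the inner 'while j < len(R) and R[j] < i - 1: j += 1', as the suffix R[j:]
def bSkip (i : Int) : List Int → List Int
  | [] => []
  | r :: rest => if r < i - 1 then bSkip i rest else r :: rest

-- the 'for i in L' loop returning 'matched'; the suffix argument is R[j:]
def bLoop : List Int → List Int → Int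
  | [], _ => 0
  | i :: t, R =>
    match bSkip i R with
    | [] => bLoop t []
    | r :: rest =>
      if r = i - 1 then 1 + bLoop t rest
      else if r = i + 1 then 1 + bLoop t rest
      else bLoop t (r :: rest)

def solution_alt (n : Int) (lost : List Int) (reserve : List Int) : Int :=
  let L := PySem.List.sorted (PySem.Set.diff (PySem.Set.ofList lost) (PySem.Set.ofList reserve)) (fun x => x) false
  let R := PySem.List.sorted (PySem.Set.diff (PySem.Set.ofList reserve) (PySem.Set.ofList lost)) (fun x => x) false
  n - ((L.length : Int) - bLoop L R)

-- ===== PRECONDITION & SPEC =====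
def Spec_solution (n : Int) (lost : List Int) (reserve : List Int) (out : Int) : Prop := out = solution_alt n lost reserve
instance (n : Int) (lost : List Int) (reserve : List Int) (out : Int) : Decidable (Spec_solution n lost reserve out) := by unfold Spec_solution; infer_instance

-- ===== CLAIM (what is proved, stated in full; the proofs are below) =====
def Claim_equal_solution : Prop := ∀ (n : Int) (lost : List Int) (reserve : List Int), Dom_solution n lost reserve → Spec_solution n lost reserve (solution n lost reserve)

-- ===== LEMMAS AND PROOFS =====

-- A-side match counter (how many i get removed from lost)
def aCount : List Int → List Int → Nat
  | [], _ => 0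
  | i :: t, res =>
    if (i - 1) ∈ res then aCount t (res.erase (i - 1)) + 1
    else if (i + 1) ∈ res then aCount t (res.erase (i + 1)) + 1
    else aCount t res

lemma aCount_le (t : List Int) : ∀ res, aCount t res ≤ t.length := by
  induction t with
  | nil => intro res; simp [aCount]
  | cons i t ih =>
    intro res
    simp only [aCount, List.length_cons]
    split_ifs <;> first | exact Nat.succ_le_succ (ih _) | exact Nat.le_succ_of_le (ih _)

lemma aLoop_len (t : List Int) : ∀ res lst, lst.Nodup → t.Nodup → (∀ x ∈ t, x ∈ lst) →
    (aLoop t res lst).2.length = lst.length - aCount t res := by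
  induction t with
  | nil => intro res lst _ _ _; simp [aLoop, aCount]
  | cons i t ih =>
    intro res lst hlst hnd hsub
    have hi : i ∈ lst := hsub i (by simp)
    have hlen : (lst.erase i).length = lst.length - 1 := by
      rw [List.length_erase]; simp [hi]
    have hnd' : (lst.erase i).Nodup := hlst.erase i
    have hsub' : ∀ x ∈ t, x ∈ lst.erase i := by
      intro x hx
      have hne : x ≠ i := by
        rintro rfl; exact (List.nodup_cons.mp hnd).1 hx
      exact hlst.mem_erase_iff.mpr ⟨hne, hsub x (by simp [hx])⟩
    have htnd : t.Nodup := (List.nodup_cons.mp hnd).2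
    simp only [aLoop, aCount]
    split_ifs with h1 h2
    · rw [ih _ _ hnd' htnd hsub', hlen]
      have := aCount_le t (res.erase (i - 1))
      omega
    · rw [ih _ _ hnd' htnd hsub', hlen]
      omega
    · exact ih _ _ hlst htnd (fun x hx => hsub x (by simp [hx]))

-- a value below every queried index never matches and is never erased
lemma aCount_drop (t : List Int) : ∀ r res, (∀ x ∈ t, r < x - 1) →
    aCount t (r :: res) = aCount t res := by
  induction t with
  | nil => intro r res _; simp [aCount]
  | cons i t ih =>
    intro r res h
    have hi : r < i - 1 := h i (by simp)
    have ht : ∀ x ∈ t, r < x - 1 := fun x hx => h x (by simp [hx])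
    have e1 : (r :: res).erase (i - 1) = r :: res.erase (i - 1) :=
      List.erase_cons_tail (by simp; omega)
    have e2 : (r :: res).erase (i + 1) = r :: res.erase (i + 1) :=
      List.erase_cons_tail (by simp; omega)
    simp only [aCount]
    by_cases c1 : (i - 1) ∈ res
    · rw [if_pos (by simp [c1] : (i - 1) ∈ r :: res), if_pos c1, e1, ih _ _ ht]
    · have n1 : (i - 1) ∉ r :: res := by
        intro hm; rcases List.mem_cons.mp hm with he | hm
        · omega
        · exact c1 hm
      rw [if_neg n1, if_neg c1]
      by_cases c2 : (i + 1) ∈ res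
      · rw [if_pos (by simp [c2] : (i + 1) ∈ r :: res), if_pos c2, e2, ih _ _ ht]
      · have n2 : (i + 1) ∉ r :: res := by
          intro hm; rcases List.mem_cons.mp hm with he | hm
          · omega
          · exact c2 hm
        rw [if_neg n2, if_neg c2]
        exact ih _ _ ht

lemma bSkip_of_not_lt (i r : Int) (rest : List Int) (h : ¬ r < i - 1) :
    bSkip i (r :: rest) = r :: rest := by simp [bSkip, h]

lemma not_mem_of_forall_lt {v : Int} {res : List Int} (h : ∀ x ∈ res, v < x) : v ∉ res := by
  intro hv; exact absurd (h v hv) (lt_irrefl v)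

-- the core equivalence of the two loops, on sorted disjoint lists
lemma count_eq (t : List Int) : ∀ res, t.Pairwise (· < ·) → res.Pairwise (· < ·) →
    (∀ x ∈ t, x ∉ res) → (aCount t res : Int) = bLoop t res := by
  induction t with
  | nil => intro res _ _ _; simp [aCount, bLoop]
  | cons i t ih =>
    intro res hT hR hD
    have hTt : t.Pairwise (· < ·) := (List.pairwise_cons.mp hT).2
    have hTi : ∀ x ∈ t, i < x := (List.pairwise_cons.mp hT).1
    induction res with
    | nil =>
      simp only [aCount, bLoop, bSkip, List.not_mem_nil, if_false]
      exact ih [] hTt (by simp) (by simp)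
    | cons r rest ihr =>
      have hRr : ∀ x ∈ rest, r < x := (List.pairwise_cons.mp hR).1
      have hRrest : rest.Pairwise (· < ·) := (List.pairwise_cons.mp hR).2
      have hDrest : ∀ x ∈ i :: t, x ∉ rest := fun x hx hm => hD x hx (by simp [hm])
      have hDt : ∀ x ∈ t, x ∉ r :: rest := fun x hx => hD x (by simp [hx])
      have hDtrest : ∀ x ∈ t, x ∉ rest := fun x hx h => hDt x hx (by simp [h])
      have hir : i ≠ r := fun h => hD i (by simp) (by simp [h])
      by_cases hlt : r < i - 1
      · -- skip r on both sides
        have hall : ∀ x ∈ i :: t, r < x - 1 := by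
          intro x hx; rcases List.mem_cons.mp hx with rfl | hx
          · exact hlt
          · have := hTi x hx; omega
        have hb : bLoop (i :: t) (r :: rest) = bLoop (i :: t) rest := by
          simp only [bLoop, bSkip, if_pos hlt]
        rw [aCount_drop _ _ _ hall, hb]
        exact ihr hRrest hDrest
      · by_cases h1 : r = i - 1
        · -- match on i-1 at the head
          have herase : (r :: rest).erase (i - 1) = rest := by
            rw [h1]; simp [List.erase_cons_head]
          have hb : bLoop (i :: t) (r :: rest) = 1 + bLoop t rest := by
            simp only [bLoop, bSkip_of_not_lt i r rest hlt, if_pos h1]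
          rw [aCount, if_pos (by simp [h1] : (i - 1) ∈ r :: rest), herase, hb]
          push_cast
          rw [ih rest hTt hRrest hDtrest]; ring
        · -- here r ≥ i+1, so i-1 never occurs in the reserve list
          have hri : i + 1 ≤ r := by omega
          have hnm1 : (i - 1) ∉ r :: rest := by
            apply not_mem_of_forall_lt; intro x hx
            rcases List.mem_cons.mp hx with rfl | hx
            · omega
            · have := hRr x hx; omega
          by_cases h2 : r = i + 1
          · -- match on i+1 at the head
            have herase : (r :: rest).erase (i + 1) = rest := by
              rw [h2]; simp [List.erase_cons_head]
            have hb : bLoop (i :: t) (r :: rest) = 1 + bLoop t rest := by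
              simp only [bLoop, bSkip_of_not_lt i r rest hlt, if_neg h1, if_pos h2]
            rw [aCount, if_neg hnm1, if_pos (by simp [h2] : (i + 1) ∈ r :: rest), herase, hb]
            push_cast
            rw [ih rest hTt hRrest hDtrest]; ring
          · -- r > i+1 : no match for i on either side
            have hnm2 : (i + 1) ∉ r :: rest := by
              apply not_mem_of_forall_lt; intro x hx
              rcases List.mem_cons.mp hx with rfl | hx
              · omega
              · have := hRr x hx; omega
            have hb : bLoop (i :: t) (r :: rest) = bLoop t (r :: rest) := by
              simp only [bLoop, bSkip_of_not_lt i r rest hlt, if_neg h1, if_neg h2]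
            rw [aCount, if_neg hnm1, if_neg hnm2, hb]
            exact ih (r :: rest) hTt hR hDt

-- sorted over a Nodup list is strictly increasing
lemma sortedSet_pairwise_lt (xs : List Int) (h : xs.Nodup) :
    (PySem.List.sorted xs (fun x => x) false).Pairwise (· < ·) := by
  have hperm := PySem.List.sorted_perm (xs := xs) (key := fun x => x) (rev := false)
  have hnd : (PySem.List.sorted xs (fun x => x) false).Nodup := hperm.nodup_iff.mpr h
  have hle : (PySem.List.sorted xs (fun x => x) false).Pairwise (· ≤ ·) :=
    PySem.List.sorted_pairwise xs (fun x => x)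
  exact (hle.and hnd).imp (fun h => lt_of_le_of_ne h.1 h.2)

-- the two function bodies agree once the sorted disjoint lists are abstracted
lemma core (n : Int) (L R : List Int) (hLnd : L.Nodup)
    (hL : L.Pairwise (· < ·)) (hR : R.Pairwise (· < ·)) (hD : ∀ x ∈ L, x ∉ R) :
    n - ((aLoop L R L).2.length : Int) = n - ((L.length : Int) - bLoop L R) := by
  rw [aLoop_len L R L hLnd hLnd (fun x hx => hx)]
  have hcnt : (aCount L R : Int) = bLoop L R := count_eq L R hL hR hD
  have hle := aCount_le L R
  push_cast [Nat.cast_sub hle]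
  omega

-- ===== VERDICT (by name: the statement is the Claim_ definition above) =====
theorem solution_spec : Claim_equal_solution := by
  intro n lost reserve _
  unfold Spec_solution solution solution_alt
  have hLnd : (PySem.List.sorted (PySem.Set.diff (PySem.Set.ofList lost) (PySem.Set.ofList reserve)) (fun x => x) false).Nodup :=
    (PySem.List.sorted_perm ..).nodup_iff.mpr
      (PySem.Set.nodup_diff _ _ (PySem.Set.nodup_ofList lost))
  have hD : ∀ x ∈ PySem.List.sorted (PySem.Set.diff (PySem.Set.ofList lost) (PySem.Set.ofList reserve)) (fun x => x) false,
      x ∉ PySem.List.sorted (PySem.Set.diff (PySem.Set.ofList reserve) (PySem.Set.ofList lost)) (fun x => x) false := by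
    intro x hxL hxR
    have h1 := (PySem.Set.mem_diff _ _ _).mp ((PySem.List.sorted_perm ..).mem_iff.mp hxL)
    have h2 := (PySem.Set.mem_diff _ _ _).mp ((PySem.List.sorted_perm ..).mem_iff.mp hxR)
    exact h1.2 h2.1
  exact core n _ _ hLnd
    (sortedSet_pairwise_lt _ (PySem.Set.nodup_diff _ _ (PySem.Set.nodup_ofList lost)))
    (sortedSet_pairwise_lt _ (PySem.Set.nodup_diff _ _ (PySem.Set.nodup_ofList reserve)))
    hD
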